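-- pv_equiv track=rewrite | github.com/jwg4/t-tetromino | results/check.py | is_t_tetromino
-- ===== SOURCE A (Python) =====
-- def is_t_tetromino(tile):
--     if len(tile) != 4:
--         return False
--     if len(set(tile)) != 4:
--         return False
--     for square in tile:
--         if all(_is_adjacent_or_same(square, other_square) for other_square in tile):
--             return True
--     return False
--
-- def _is_adjacent_or_same(square, other_square):
--     x, y = square
--     ox, oy = other_square
--     return abs(x - ox) + abs(y - oy) <= 1
-- ===== SOURCE B (Python) =====
-- def is_t_tetromino(tile):
--     if len(tile) != 4:
--         return False
--     if len(set(tile)) != 4: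
--         return False
--     dists = [abs(x - ox) + abs(y - oy)
--              for i, (x, y) in enumerate(tile)
--              for (ox, oy) in tile[i + 1:]]
--     return sorted(dists) == [1, 1, 1, 2, 2, 2]
-- ===== Notes on version B (the rewrite author's own statement) =====
-- stated objective: alternative
-- what changed: Replaces the center-finding scan (some square adjacent to all others) by a geometric distance-signature test: the sorted multiset of the six pairwise Manhattan distances must equal [1,1,1,2,2,2].
import Mathlib
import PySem

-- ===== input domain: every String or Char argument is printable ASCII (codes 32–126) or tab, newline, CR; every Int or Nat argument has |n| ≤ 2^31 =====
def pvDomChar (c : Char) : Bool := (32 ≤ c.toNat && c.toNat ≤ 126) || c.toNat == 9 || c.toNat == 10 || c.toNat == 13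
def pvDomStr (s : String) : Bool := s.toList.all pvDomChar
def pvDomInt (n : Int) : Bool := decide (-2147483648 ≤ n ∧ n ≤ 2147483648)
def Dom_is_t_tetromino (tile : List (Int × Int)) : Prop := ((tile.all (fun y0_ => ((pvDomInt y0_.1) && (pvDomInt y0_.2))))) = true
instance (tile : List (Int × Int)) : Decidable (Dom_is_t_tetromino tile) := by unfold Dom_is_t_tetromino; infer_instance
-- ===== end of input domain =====

-- B replaces A's center-finding scan (some square adjacent to all others) by a
-- pairwise-distance-signature match (objective: alternative, same behaviour and cost).

-- ===== PORT A =====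
def pv_is_adjacent_or_same (square other_square : Int × Int) : Bool :=
  |square.1 - other_square.1| + |square.2 - other_square.2| ≤ 1

def is_t_tetromino (tile : List (Int × Int)) : Bool :=
  if tile.length ≠ 4 then false
  else if (PySem.Set.ofList tile).length ≠ 4 then false
  else tile.any (fun square =>
    tile.all (fun other_square => pv_is_adjacent_or_same square other_square))

-- ===== PORT B =====
def is_t_tetromino_alt (tile : List (Int × Int)) : Bool :=
  if tile.length ≠ 4 then false
  else if (PySem.Set.ofList tile).length ≠ 4 then false
  else
    let dists := (PySem.List.enumerate tile).flatMap (fun ip =>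
      (PySem.List.slice tile (some (ip.1 + 1)) none).map (fun o =>
        |ip.2.1 - o.1| + |ip.2.2 - o.2|))
    PySem.List.sorted dists (fun d => d) false == [1, 1, 1, 2, 2, 2]

-- ===== PRECONDITION & SPEC =====
def Spec_is_t_tetromino (tile : List (Int × Int)) (out : Bool) : Prop := out = is_t_tetromino_alt tile
instance (tile : List (Int × Int)) (out : Bool) : Decidable (Spec_is_t_tetromino tile out) := by unfold Spec_is_t_tetromino; infer_instance

-- ===== CLAIM (what is proved, stated in full; the proofs are below) =====
def Claim_equal_is_t_tetromino : Prop := ∀ (tile : List (Int × Int)), Dom_is_t_tetromino tile → Spec_is_t_tetromino tile (is_t_tetromino tile)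

-- ===== LEMMAS AND PROOFS =====

-- set(xs) keeps the full length only on duplicate-free lists
theorem pv_nodup_of_ofList_length {α : Type} [BEq α] [LawfulBEq α] (xs : List α)
    (h : (PySem.Set.ofList xs).length = xs.length) : xs.Nodup := by
  induction xs with
  | nil => exact List.nodup_nil
  | cons x xs ih =>
      rw [PySem.Set.ofList_cons] at h
      have hle : (PySem.Set.ofList xs).length ≤ xs.length := PySem.Set.length_ofList_le xs
      have hfle : ((PySem.Set.ofList xs).discard x).length ≤ (PySem.Set.ofList xs).length :=
        List.length_filter_le _ _
      have hx : x ∉ xs := by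
        intro hmem
        have hxs : x ∈ PySem.Set.ofList xs := (PySem.Set.mem_ofList xs x).mpr hmem
        have hlt : ((PySem.Set.ofList xs).discard x).length < (PySem.Set.ofList xs).length := by
          apply List.length_filter_lt_length_iff_exists.mpr
          exact ⟨x, hxs, by simp⟩
        simp [List.length_cons] at h
        omega
      have hdx : (PySem.Set.ofList xs).discard x = PySem.Set.ofList xs := by
        apply List.filter_eq_self.mpr
        intro y hy
        have hyxs : y ∈ xs := (PySem.Set.mem_ofList xs y).mp hy
        have hne : y ≠ x := fun e => hx (e ▸ hyxs)
        simp [hne]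
      rw [hdx, List.length_cons, List.length_cons] at h
      exact List.Nodup.cons hx (ih (by omega))

-- flip the orientation of a Manhattan distance
theorem pv_flip (x1 y1 x2 y2 k : Int)
    (h : (↑(x2 - x1).natAbs : Int) + ↑(y2 - y1).natAbs = k) :
    (↑(x1 - x2).natAbs : Int) + ↑(y1 - y2).natAbs = k := by omega

-- distinct points at Manhattan distance ≤ 1 are at distance exactly 1
theorem pv_unit (x1 y1 x2 y2 : Int) (hne : ¬(x1 = x2 ∧ y1 = y2))
    (h : (↑(x1 - x2).natAbs : Int) + ↑(y1 - y2).natAbs ≤ 1) :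
    (↑(x1 - x2).natAbs : Int) + ↑(y1 - y2).natAbs = 1 := by omega

-- distinct points are at Manhattan distance ≥ 1
theorem pv_ge1 (x1 y1 x2 y2 : Int) (hne : ¬(x1 = x2 ∧ y1 = y2)) :
    1 ≤ (↑(x1 - x2).natAbs : Int) + ↑(y1 - y2).natAbs := by omega

-- two distinct unit neighbours of a common centre are at distance exactly 2
theorem pv_cross (cx0 cy0 x1 y1 x2 y2 : Int)
    (h1 : (↑(cx0 - x1).natAbs : Int) + ↑(cy0 - y1).natAbs = 1)
    (h2 : (↑(cx0 - x2).natAbs : Int) + ↑(cy0 - y2).natAbs = 1)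
    (hne : ¬(x1 = x2 ∧ y1 = y2)) :
    (↑(x1 - x2).natAbs : Int) + ↑(y1 - y2).natAbs = 2 := by omega

-- a Manhattan distance has the parity of the sum of all four coordinates
theorem pv_par (x1 y1 x2 y2 : Int) :
    ((↑(x1 - x2).natAbs : Int) + ↑(y1 - y2).natAbs) % 2 = ((x1 + y1) + (x2 + y2)) % 2 := by
  omega

-- counting + parity: six pairwise distances in {1,2} summing to 9 single out a centre
theorem pv_count (pa pb pc pd dab dac dad dbc dbd dcd : Int)
    (h1 : 1 ≤ dab) (h1' : dab ≤ 2) (h2 : 1 ≤ dac) (h2' : dac ≤ 2)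
    (h3 : 1 ≤ dad) (h3' : dad ≤ 2) (h4 : 1 ≤ dbc) (h4' : dbc ≤ 2)
    (h5 : 1 ≤ dbd) (h5' : dbd ≤ 2) (h6 : 1 ≤ dcd) (h6' : dcd ≤ 2)
    (hs : dab + dac + dad + dbc + dbd + dcd = 9)
    (p1 : dab % 2 = (pa + pb) % 2) (p2 : dac % 2 = (pa + pc) % 2)
    (p3 : dad % 2 = (pa + pd) % 2) (p4 : dbc % 2 = (pb + pc) % 2)
    (p5 : dbd % 2 = (pb + pd) % 2) (p6 : dcd % 2 = (pc + pd) % 2) :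
    (dab = 1 ∧ dac = 1 ∧ dad = 1) ∨ (dab = 1 ∧ dbc = 1 ∧ dbd = 1) ∨
    (dac = 1 ∧ dbc = 1 ∧ dcd = 1) ∨ (dad = 1 ∧ dbd = 1 ∧ dcd = 1) := by
  have e1 : dab = 1 ∨ dab = 2 := by omega
  have e2 : dac = 1 ∨ dac = 2 := by omega
  have e3 : dad = 1 ∨ dad = 2 := by omega
  have e4 : dbc = 1 ∨ dbc = 2 := by omega
  have e5 : dbd = 1 ∨ dbd = 2 := by omega
  have e6 : dcd = 1 ∨ dcd = 2 := by omega
  rcases e1 with rfl|rfl <;> rcases e2 with rfl|rfl <;> rcases e3 with rfl|rfl <;>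
    rcases e4 with rfl|rfl <;> rcases e5 with rfl|rfl <;> rcases e6 with rfl|rfl <;>
    omega

-- a permutation characterisation of B's sorted-signature test
theorem pv_perm_sig (d1 d2 d3 d4 d5 d6 : Int)
    (h1 : 1 ≤ d1) (h2 : 1 ≤ d2) (h3 : 1 ≤ d3) (h4 : 1 ≤ d4) (h5 : 1 ≤ d5) (h6 : 1 ≤ d6) :
    ([1, 1, 1, 2, 2, 2] : List Int).Perm [d1, d2, d3, d4, d5, d6] ↔
      (d1 ≤ 2 ∧ d2 ≤ 2 ∧ d3 ≤ 2 ∧ d4 ≤ 2 ∧ d5 ≤ 2 ∧ d6 ≤ 2 ∧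
        d1 + d2 + d3 + d4 + d5 + d6 = 9) := by
  constructor
  · intro hp
    have hm : ∀ x ∈ [d1, d2, d3, d4, d5, d6], x ∈ ([1,1,1,2,2,2] : List Int) :=
      fun x hx => hp.mem_iff.mpr hx
    have hsum := hp.sum_eq
    simp [List.mem_cons] at hm
    obtain ⟨m1, m2, m3, m4, m5, m6⟩ := hm
    simp at hsum
    refine ⟨?_, ?_, ?_, ?_, ?_, ?_, ?_⟩ <;> omega
  · rintro ⟨b1, b2, b3, b4, b5, b6, hs⟩
    have e1 : d1 = 1 ∨ d1 = 2 := by omega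
    have e2 : d2 = 1 ∨ d2 = 2 := by omega
    have e3 : d3 = 1 ∨ d3 = 2 := by omega
    have e4 : d4 = 1 ∨ d4 = 2 := by omega
    have e5 : d5 = 1 ∨ d5 = 2 := by omega
    have e6 : d6 = 1 ∨ d6 = 2 := by omega
    rcases e1 with rfl|rfl <;> rcases e2 with rfl|rfl <;> rcases e3 with rfl|rfl <;>
      rcases e4 with rfl|rfl <;> rcases e5 with rfl|rfl <;> rcases e6 with rfl|rfl <;>
      first | (exfalso; omega) | decide

-- distinct points are at Manhattan distance ≥ 1 (absolute-value form)
theorem pv_ge1_abs (x1 y1 x2 y2 : Int) (hne : ¬(x1 = x2 ∧ y1 = y2)) :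
    1 ≤ |x1 - x2| + |y1 - y2| := by
  simp only [Int.abs_eq_natAbs]; exact pv_ge1 x1 y1 x2 y2 hne

-- the geometric core: for four pairwise distinct grid points, some point is adjacent
-- to all others iff all six pairwise distances are ≤ 2 and they sum to 9
set_option maxHeartbeats 1000000 in
theorem pv_core (ax ay bx by_ cx cy dx dy : Int)
    (hab : ¬(ax = bx ∧ ay = by_)) (hac : ¬(ax = cx ∧ ay = cy)) (had : ¬(ax = dx ∧ ay = dy))
    (hbc : ¬(bx = cx ∧ by_ = cy)) (hbd : ¬(bx = dx ∧ by_ = dy)) (hcd : ¬(cx = dx ∧ cy = dy)) :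
    ((|ax - bx| + |ay - by_| ≤ 1 ∧ |ax - cx| + |ay - cy| ≤ 1 ∧ |ax - dx| + |ay - dy| ≤ 1) ∨
     (|bx - ax| + |by_ - ay| ≤ 1 ∧ |bx - cx| + |by_ - cy| ≤ 1 ∧ |bx - dx| + |by_ - dy| ≤ 1) ∨
     (|cx - ax| + |cy - ay| ≤ 1 ∧ |cx - bx| + |cy - by_| ≤ 1 ∧ |cx - dx| + |cy - dy| ≤ 1) ∨
     (|dx - ax| + |dy - ay| ≤ 1 ∧ |dx - bx| + |dy - by_| ≤ 1 ∧ |dx - cx| + |dy - cy| ≤ 1)) ↔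
    (|ax - bx| + |ay - by_| ≤ 2 ∧ |ax - cx| + |ay - cy| ≤ 2 ∧ |ax - dx| + |ay - dy| ≤ 2 ∧
     |bx - cx| + |by_ - cy| ≤ 2 ∧ |bx - dx| + |by_ - dy| ≤ 2 ∧ |cx - dx| + |cy - dy| ≤ 2 ∧
     (|ax - bx| + |ay - by_|) + (|ax - cx| + |ay - cy|) + (|ax - dx| + |ay - dy|) +
     (|bx - cx| + |by_ - cy|) + (|bx - dx| + |by_ - dy|) + (|cx - dx| + |cy - dy|) = 9) := by
  have hba : ¬(bx = ax ∧ by_ = ay) := fun ⟨u, v⟩ => hab ⟨u.symm, v.symm⟩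
  have hca : ¬(cx = ax ∧ cy = ay) := fun ⟨u, v⟩ => hac ⟨u.symm, v.symm⟩
  have hda : ¬(dx = ax ∧ dy = ay) := fun ⟨u, v⟩ => had ⟨u.symm, v.symm⟩
  have hcb : ¬(cx = bx ∧ cy = by_) := fun ⟨u, v⟩ => hbc ⟨u.symm, v.symm⟩
  have hdb : ¬(dx = bx ∧ dy = by_) := fun ⟨u, v⟩ => hbd ⟨u.symm, v.symm⟩
  have hdc : ¬(dx = cx ∧ dy = cy) := fun ⟨u, v⟩ => hcd ⟨u.symm, v.symm⟩
  simp only [Int.abs_eq_natAbs]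
  constructor
  · rintro (⟨h1, h2, h3⟩ | ⟨h1, h2, h3⟩ | ⟨h1, h2, h3⟩ | ⟨h1, h2, h3⟩)
    · have eab := pv_unit ax ay bx by_ hab h1
      have eac := pv_unit ax ay cx cy hac h2
      have ead := pv_unit ax ay dx dy had h3
      have ebc := pv_cross ax ay bx by_ cx cy eab eac hbc
      have ebd := pv_cross ax ay bx by_ dx dy eab ead hbd
      have ecd := pv_cross ax ay cx cy dx dy eac ead hcd
      rw [eab, eac, ead, ebc, ebd, ecd]; norm_num
    · have eba := pv_unit bx by_ ax ay hba h1
      have ebc := pv_unit bx by_ cx cy hbc h2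
      have ebd := pv_unit bx by_ dx dy hbd h3
      have eab := pv_flip ax ay bx by_ 1 eba
      have eac := pv_cross bx by_ ax ay cx cy eba ebc hac
      have ead := pv_cross bx by_ ax ay dx dy eba ebd had
      have ecd := pv_cross bx by_ cx cy dx dy ebc ebd hcd
      rw [eab, eac, ead, ebc, ebd, ecd]; norm_num
    · have eca := pv_unit cx cy ax ay hca h1
      have ecb := pv_unit cx cy bx by_ hcb h2
      have ecd := pv_unit cx cy dx dy hcd h3
      have eac := pv_flip ax ay cx cy 1 eca
      have ebc := pv_flip bx by_ cx cy 1 ecb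
      have eab := pv_cross cx cy ax ay bx by_ eca ecb hab
      have ead := pv_cross cx cy ax ay dx dy eca ecd had
      have ebd := pv_cross cx cy bx by_ dx dy ecb ecd hbd
      rw [eab, eac, ead, ebc, ebd, ecd]; norm_num
    · have eda := pv_unit dx dy ax ay hda h1
      have edb := pv_unit dx dy bx by_ hdb h2
      have edc := pv_unit dx dy cx cy hdc h3
      have ead := pv_flip ax ay dx dy 1 eda
      have ebd := pv_flip bx by_ dx dy 1 edb
      have ecd := pv_flip cx cy dx dy 1 edc
      have eab := pv_cross dx dy ax ay bx by_ eda edb hab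
      have eac := pv_cross dx dy ax ay cx cy eda edc hac
      have ebc := pv_cross dx dy bx by_ cx cy edb edc hbc
      rw [eab, eac, ead, ebc, ebd, ecd]; norm_num
  · rintro ⟨b1, b2, b3, b4, b5, b6, hs⟩
    have g1 := pv_ge1 ax ay bx by_ hab
    have g2 := pv_ge1 ax ay cx cy hac
    have g3 := pv_ge1 ax ay dx dy had
    have g4 := pv_ge1 bx by_ cx cy hbc
    have g5 := pv_ge1 bx by_ dx dy hbd
    have g6 := pv_ge1 cx cy dx dy hcd
    have q1 := pv_par ax ay bx by_
    have q2 := pv_par ax ay cx cy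
    have q3 := pv_par ax ay dx dy
    have q4 := pv_par bx by_ cx cy
    have q5 := pv_par bx by_ dx dy
    have q6 := pv_par cx cy dx dy
    have hcnt := pv_count (ax + ay) (bx + by_) (cx + cy) (dx + dy)
      _ _ _ _ _ _ g1 b1 g2 b2 g3 b3 g4 b4 g5 b5 g6 b6 hs q1 q2 q3 q4 q5 q6
    rcases hcnt with ⟨e1, e2, e3⟩ | ⟨e1, e2, e3⟩ | ⟨e1, e2, e3⟩ | ⟨e1, e2, e3⟩
    · exact Or.inl ⟨le_of_eq e1, le_of_eq e2, le_of_eq e3⟩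
    · exact Or.inr (Or.inl ⟨le_of_eq (pv_flip bx by_ ax ay 1 e1), le_of_eq e2, le_of_eq e3⟩)
    · exact Or.inr (Or.inr (Or.inl ⟨le_of_eq (pv_flip cx cy ax ay 1 e1),
        le_of_eq (pv_flip cx cy bx by_ 1 e2), le_of_eq e3⟩))
    · exact Or.inr (Or.inr (Or.inr ⟨le_of_eq (pv_flip dx dy ax ay 1 e1),
        le_of_eq (pv_flip dx dy bx by_ 1 e2), le_of_eq (pv_flip dx dy cx cy 1 e3)⟩))

-- ===== VERDICT (by name: the statement is the Claim_ definition above) =====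
set_option maxHeartbeats 1000000 in
theorem is_t_tetromino_spec : Claim_equal_is_t_tetromino := by
  intro tile _
  unfold Spec_is_t_tetromino is_t_tetromino is_t_tetromino_alt
  by_cases hl : tile.length = 4
  · by_cases hs : (PySem.Set.ofList tile).length = 4
    · rcases tile with _ | ⟨a, _ | ⟨b, _ | ⟨c, _ | ⟨d, _ | ⟨e, t⟩⟩⟩⟩⟩ <;> simp_all
      have hnd : ([a, b, c, d] : List (Int × Int)).Nodup :=
        pv_nodup_of_ofList_length [a, b, c, d] (by rw [hs]; rfl)
      simp only [List.nodup_cons, List.mem_cons, List.not_mem_nil, or_false,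
        List.nodup_nil, not_or, and_true] at hnd
      obtain ⟨⟨nab, nac, nad⟩, ⟨nbc, nbd⟩, ncd, -⟩ := hnd
      have hab : ¬(a.1 = b.1 ∧ a.2 = b.2) := fun h => nab (Prod.ext_iff.mpr h)
      have hac : ¬(a.1 = c.1 ∧ a.2 = c.2) := fun h => nac (Prod.ext_iff.mpr h)
      have had : ¬(a.1 = d.1 ∧ a.2 = d.2) := fun h => nad (Prod.ext_iff.mpr h)
      have hbc : ¬(b.1 = c.1 ∧ b.2 = c.2) := fun h => nbc (Prod.ext_iff.mpr h)
      have hbd : ¬(b.1 = d.1 ∧ b.2 = d.2) := fun h => nbd (Prod.ext_iff.mpr h)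
      have hcd : ¬(c.1 = d.1 ∧ c.2 = d.2) := fun h => ncd (Prod.ext_iff.mpr h)
      have s1 : PySem.List.slice [a, b, c, d] (some (1 : Int)) none = [b, c, d] := rfl
      have s2 : PySem.List.slice [a, b, c, d] (some (2 : Int)) none = [c, d] := rfl
      have s3 : PySem.List.slice [a, b, c, d] (some (3 : Int)) none = [d] := rfl
      have s4 : PySem.List.slice [a, b, c, d] (some (4 : Int)) none = [] := rfl
      have hsort : ∀ (ds : List Int),
          (PySem.List.sorted ds (fun d => d) false = [1, 1, 1, 2, 2, 2]) ↔
            ([1, 1, 1, 2, 2, 2] : List Int).Perm ds := by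
        intro ds
        constructor
        · intro h
          exact h ▸ PySem.List.sorted_perm ds (fun d => d) false
        · intro hp
          exact PySem.List.sorted_id_eq_of_perm_of_pairwise ds _ hp (by decide)
      rw [Bool.eq_iff_iff]
      simp only [s1, s2, s3, s4, List.map_cons, List.map_nil, List.append_nil,
        List.cons_append, List.nil_append, pv_is_adjacent_or_same,
        Bool.and_eq_true, Bool.or_eq_true, decide_eq_true_eq, beq_iff_eq,
        sub_self, abs_zero, add_zero, hsort]
      rw [pv_perm_sig _ _ _ _ _ _
        (pv_ge1_abs a.1 a.2 b.1 b.2 hab) (pv_ge1_abs a.1 a.2 c.1 c.2 hac)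
        (pv_ge1_abs a.1 a.2 d.1 d.2 had) (pv_ge1_abs b.1 b.2 c.1 c.2 hbc)
        (pv_ge1_abs b.1 b.2 d.1 d.2 hbd) (pv_ge1_abs c.1 c.2 d.1 d.2 hcd)]
      have hcore := pv_core a.1 a.2 b.1 b.2 c.1 c.2 d.1 d.2 hab hac had hbc hbd hcd
      constructor
      · rintro (⟨-, u1, u2, u3⟩ | ⟨u1, -, u2, u3⟩ | ⟨u1, u2, -, u3⟩ | ⟨u1, u2, u3, -⟩)
        · exact hcore.mp (Or.inl ⟨u1, u2, u3⟩)
        · exact hcore.mp (Or.inr (Or.inl ⟨u1, u2, u3⟩))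
        · exact hcore.mp (Or.inr (Or.inr (Or.inl ⟨u1, u2, u3⟩)))
        · exact hcore.mp (Or.inr (Or.inr (Or.inr ⟨u1, u2, u3⟩)))
      · intro h
        rcases hcore.mpr h with ⟨u1, u2, u3⟩ | ⟨u1, u2, u3⟩ | ⟨u1, u2, u3⟩ | ⟨u1, u2, u3⟩
        · exact Or.inl ⟨by norm_num, u1, u2, u3⟩
        · exact Or.inr (Or.inl ⟨u1, by norm_num, u2, u3⟩)
        · exact Or.inr (Or.inr (Or.inl ⟨u1, u2, by norm_num, u3⟩))
        · exact Or.inr (Or.inr (Or.inr ⟨u1, u2, u3, by norm_num⟩))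
    · simp [hs]
  · simp [hl]
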